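-- pv_equiv track=rewrite | github.com/blueboy1593/algorithm | SSAFY알고리즘정규시간 Problem Solving/9월 Problem Solving/0905problem/1493수의새로운연산.py | find_coordinate
-- ===== SOURCE A (Python) =====
-- def find_sum(num):
--     summ = num * (num + 1)//2
--     return summ
--
-- def find_coordinate(num):
--     for i in range(200):
--         if find_sum(i) == num:
--             x = i
--             y = 1
--             return (x, y)
--         elif find_sum(i) > num:
--             a = find_sum(i - 1)
--             b = i + 1
--             c = num - a
--             x = c
--             y = b - x
--             return (x, y)
-- ===== SOURCE B (Python) =====
-- def find_coordinate(num):
--     # diagonal grid bounded as in the original (diagonals 0..199)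
--     if num > 199 * 200 // 2:
--         return None
--     lo, hi = 0, 199
--     # binary search: smallest i in [0,199] with i*(i+1)//2 >= num
--     while lo < hi:
--         mid = (lo + hi) // 2
--         if mid * (mid + 1) // 2 >= num:
--             hi = mid
--         else:
--             lo = mid + 1
--     i = lo
--     if i * (i + 1) // 2 == num:
--         return (i, 1)
--     c = num - (i - 1) * i // 2
--     return (c, i + 1 - c)
-- ===== Notes on version B (the rewrite author's own statement) =====
-- stated objective: alternative
-- what changed: Replaces A's linear scan over the 200 diagonals with a binary search for the smallest i whose triangular number i*(i+1)//2 is >= num, then applies the same coordinate arithmetic.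
-- outside the precondition, e.g. on find_coordinate(19901): A returns None, B returns None
import Mathlib
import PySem

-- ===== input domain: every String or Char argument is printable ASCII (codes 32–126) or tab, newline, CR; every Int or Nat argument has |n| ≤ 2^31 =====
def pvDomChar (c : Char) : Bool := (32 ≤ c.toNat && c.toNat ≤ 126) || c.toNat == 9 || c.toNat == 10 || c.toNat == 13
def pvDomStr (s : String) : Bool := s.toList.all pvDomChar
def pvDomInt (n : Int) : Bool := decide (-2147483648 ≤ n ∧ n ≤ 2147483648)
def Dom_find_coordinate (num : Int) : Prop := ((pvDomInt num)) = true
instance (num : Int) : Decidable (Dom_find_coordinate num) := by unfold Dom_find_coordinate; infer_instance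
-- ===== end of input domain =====

-- B replaces A's linear scan over the 200 diagonals with a binary search for the first
-- triangular number ≥ num (objective: alternative algorithm; same branch arithmetic).


-- ===== PORT A =====
def find_sum (num : Int) : Int := PySem.Int.floordiv (num * (num + 1)) 2

def findCoordLoop (l : List Int) (num : Int) : Option (Int × Int) :=
  match l with
  | [] => none
  | i :: rest =>
    if find_sum i = num then some (i, 1)
    else if find_sum i > num then
      let a := find_sum (i - 1)
      let b := i + 1
      let c := num - a
      some (c, b - c)
    else findCoordLoop rest num

-- the Python returns None when the loop falls through (num > 19900); that case is
-- outside Pre_find_coordinate, and the port returns (0, 0) there.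
def find_coordinate (num : Int) : Int × Int :=
  (findCoordLoop (PySem.List.pyRange 0 200 1) num).getD (0, 0)

-- ===== PORT B =====
-- while lo < hi: … ; transliterated with fuel (200 > initial hi - lo, so fuel never runs out)
def bsLoop (fuel : Nat) (lo hi num : Int) : Int :=
  match fuel with
  | 0 => lo
  | fuel + 1 =>
    if lo < hi then
      let mid := PySem.Int.floordiv (lo + hi) 2
      if PySem.Int.floordiv (mid * (mid + 1)) 2 ≥ num then bsLoop fuel lo mid num
      else bsLoop fuel (mid + 1) hi num
    else lo

-- Source B returns None when num > 19900 (outside Pre_find_coordinate); the port returns (0, 0) there.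
def find_coordinate_alt (num : Int) : Int × Int :=
  if num > PySem.Int.floordiv (199 * 200) 2 then (0, 0)
  else
    let i := bsLoop 200 0 199 num
    if PySem.Int.floordiv (i * (i + 1)) 2 = num then (i, 1)
    else
      let c := num - PySem.Int.floordiv ((i - 1) * i) 2
      (c, i + 1 - c)

-- ===== PRECONDITION & SPEC =====
-- Pre_ excludes num > 19900, where the Python A (and B) return None, which is not a value of type Int × Int.
def Pre_find_coordinate (num : Int) : Prop := num ≤ 19900
instance (num : Int) : Decidable (Pre_find_coordinate num) := by unfold Pre_find_coordinate; infer_instance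
def pvWitness_find_coordinate : Int := 7

def Spec_find_coordinate (num : Int) (out : Int × Int) : Prop := out = find_coordinate_alt num
instance (num : Int) (out : Int × Int) : Decidable (Spec_find_coordinate num out) := by unfold Spec_find_coordinate; infer_instance

-- ===== CLAIM (what is proved, stated in full; the proofs are below) =====
def Claim_equal_find_coordinate : Prop := ∀ (num : Int), Dom_find_coordinate num → Pre_find_coordinate num → Spec_find_coordinate num (find_coordinate num)

-- ===== LEMMAS AND PROOFS =====

-- T i = i*(i+1)//2; find_sum i = T i, and 2 * T i = i * (i + 1)
theorem two_mul_find_sum (i : Int) : 2 * find_sum i = i * (i + 1) := by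
  unfold find_sum
  rw [PySem.Int.floordiv_eq_ediv_of_pos (by norm_num)]
  have h : (2:Int) ∣ i * (i + 1) := (Int.even_mul_succ_self i).two_dvd
  omega

-- smallest nonnegative i with T i ≥ num
def IsSmall (i num : Int) : Prop :=
  0 ≤ i ∧ num ≤ find_sum i ∧ ∀ j : Int, 0 ≤ j → j < i → find_sum j < num

theorem find_sum_mono {a b : Int} (ha : 0 ≤ a) (hab : a ≤ b) : find_sum a ≤ find_sum b := by
  have h1 := two_mul_find_sum a
  have h2 := two_mul_find_sum b
  nlinarith

-- common closed form of the branch both programs end with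
def answer (i num : Int) : Int × Int :=
  if find_sum i = num then (i, 1) else (num - find_sum (i - 1), i + 1 - (num - find_sum (i - 1)))

theorem loop_eq_answer (n : Nat) : ∀ (lo num i : Int), IsSmall i num → 0 ≤ lo → lo ≤ i →
    i < lo + n → findCoordLoop (PySem.List.pyRange lo (lo + n) 1) num = some (answer i num) := by
  induction n with
  | zero => intro lo num i _ _ h1 h2; omega
  | succ n ih =>
    intro lo num i hs hlo h1 h2
    have hcons : PySem.List.pyRange lo (lo + (n + 1 : Nat)) 1
        = lo :: PySem.List.pyRange (lo + 1) (lo + (n + 1 : Nat)) 1 := by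
      apply PySem.List.pyRange_one_cons; push_cast; omega
    rw [hcons]
    obtain ⟨hi0, hge, hmin⟩ := hs
    unfold findCoordLoop
    rcases eq_or_lt_of_le h1 with heq | hlt
    · subst heq
      unfold answer
      by_cases he : find_sum lo = num
      · simp [he]
      · have hgt : find_sum lo > num := lt_of_le_of_ne hge (fun h => he h.symm)
        simp [he, hgt]
    · have hlt' : find_sum lo < num := hmin lo hlo hlt
      have hne : ¬ find_sum lo = num := by omega
      have hngt : ¬ find_sum lo > num := by omega
      simp only [hne, hngt, if_false]
      have := ih (lo + 1) num i ⟨hi0, hge, hmin⟩ (by omega) (by omega) (by push_cast at h2 ⊢; omega)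
      have harr : lo + 1 + (n : Int) = lo + ((n : Nat) + 1 : Nat) := by push_cast; omega
      rwa [harr] at this

theorem bsLoop_eq (fuel : Nat) : ∀ (lo hi num i : Int), IsSmall i num → 0 ≤ lo → lo ≤ i →
    i ≤ hi → (hi - lo).toNat < fuel → bsLoop fuel lo hi num = i := by
  induction fuel with
  | zero => intro lo hi num i _ _ h1 h2 h3; omega
  | succ fuel ih =>
    intro lo hi num i hs hlo h1 h2 hf
    obtain ⟨hi0, hge, hmin⟩ := hs
    unfold bsLoop
    by_cases hlh : lo < hi
    · simp only [hlh, if_true]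
      have hmid := PySem.Int.floordiv_two_mid_bounds (le_of_lt hlh)
      set mid := PySem.Int.floordiv (lo + hi) 2 with hm
      have hmidlt : mid < hi := by
        rw [hm, PySem.Int.floordiv_eq_ediv_of_pos (by norm_num)]; omega
      by_cases hc : PySem.Int.floordiv (mid * (mid + 1)) 2 ≥ num
      · simp only [hc, if_true]
        have hcm : find_sum mid ≥ num := hc
        have hile : i ≤ mid := by
          by_contra h
          have := hmin mid (by omega) (by omega)
          omega
        exact ih lo mid num i ⟨hi0, hge, hmin⟩ hlo h1 hile (by omega)
      · simp only [hc, if_false]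
        have hcm : find_sum mid < num := by unfold find_sum; omega
        have hgt : mid < i := by
          by_contra h
          have := find_sum_mono hi0 (by omega : i ≤ mid)
          omega
        exact ih (mid + 1) hi num i ⟨hi0, hge, hmin⟩ (by omega) (by omega) h2 (by omega)
    · simp only [hlh, if_false]; omega

theorem exists_small {num : Int} (h : num ≤ 19900) : ∃ i, IsSmall i num ∧ i ≤ 199 := by
  have h199 : num ≤ find_sum ((199 : Nat) : Int) := by
    have : find_sum 199 = 19900 := by decide
    push_cast; omega
  have hex : ∃ n : Nat, num ≤ find_sum (n : Int) := ⟨199, h199⟩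
  refine ⟨(Nat.find hex : Int), ⟨Int.natCast_nonneg _, Nat.find_spec hex, ?_⟩, ?_⟩
  · intro j hj0 hjk
    have hjn : (j.toNat : Int) = j := Int.toNat_of_nonneg hj0
    have hlt : j.toNat < Nat.find hex := by omega
    have := Nat.find_min hex hlt
    rw [hjn] at this; omega
  · have : Nat.find hex ≤ 199 := Nat.find_min' hex h199
    omega

-- ===== VERDICT (by name: the statement is the Claim_ definition above) =====
theorem find_coordinate_spec : Claim_equal_find_coordinate := by
  intro num _ hpre
  unfold Pre_find_coordinate at hpre
  unfold Spec_find_coordinate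
  obtain ⟨i, hs, h199⟩ := exists_small hpre
  have hi0 : 0 ≤ i := hs.1
  -- A side
  have hA : find_coordinate num = answer i num := by
    unfold find_coordinate
    have h200 : (200 : Int) = (0 : Int) + ((200 : Nat) : Int) := by norm_num
    rw [h200, loop_eq_answer 200 0 num i hs le_rfl hi0 (by push_cast; omega)]
    rfl
  -- B side
  have hB : find_coordinate_alt num = answer i num := by
    unfold find_coordinate_alt
    have hg : ¬ num > PySem.Int.floordiv (199 * 200) 2 := by
      have : PySem.Int.floordiv (199 * 200) 2 = 19900 := by decide
      omega
    simp only [hg, if_false]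
    rw [bsLoop_eq 200 0 199 num i hs le_rfl hi0 h199 (by norm_num)]
    unfold answer find_sum
    have he : (i - 1) * (i - 1 + 1) = (i - 1) * i := by ring
    rw [he]
  rw [hA, hB]
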